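-- pv_equiv track=rewrite | github.com/OpenVQE/OpenVQE | openvqe/common_files/sorted_gradient.py | occurence
-- ===== SOURCE A (Python) =====
-- def occurence(my_list) -> dict:
--     """
--     occurence function gives the counts of particular value in list.
--
--     Parameter of this list is 'mylistt' and returns dictionary of occurence
--
--     """
--     n = []
--     nn = []
--     my_dict = {i: my_list.count(i) for i in my_list}
--     for key, item in my_dict.items():
--         for k, i in my_dict.items():
--             if key == k * (-1):
--                 n.append(key)
--     for i in range(0, len(n)):
--         if n[i] < 0:
--             nn.append(n[i])
--     return my_dict, nn
-- ===== SOURCE B (Python) =====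
-- def occurence(my_list) -> dict:
--     counts = {}
--     for x in my_list:
--         counts[x] = counts.get(x, 0) + 1
--     nn = [k for k in counts if k < 0 and -k in counts]
--     return counts, nn
-- ===== Notes on version B (the rewrite author's own statement) =====
-- stated objective: faster
-- what changed: Replace the quadratic count-comprehension plus nested dict-items loops by a single counting pass and one filter over the keys (negation looked up by membership).
import Mathlib
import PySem

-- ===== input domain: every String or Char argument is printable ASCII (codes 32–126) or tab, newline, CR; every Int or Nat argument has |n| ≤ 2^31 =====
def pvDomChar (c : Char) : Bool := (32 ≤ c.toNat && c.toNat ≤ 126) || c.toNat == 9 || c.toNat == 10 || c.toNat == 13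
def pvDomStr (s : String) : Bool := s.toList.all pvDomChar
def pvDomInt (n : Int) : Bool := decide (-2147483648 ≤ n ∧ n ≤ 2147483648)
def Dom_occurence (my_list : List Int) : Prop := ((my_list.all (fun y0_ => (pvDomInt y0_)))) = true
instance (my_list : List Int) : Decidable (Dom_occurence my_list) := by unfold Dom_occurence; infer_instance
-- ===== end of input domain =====

-- B replaces A's quadratic count-comprehension and nested items loops by one counting pass
-- and a single filter over the keys (objective: faster).


-- ===== PORT A =====
def occurence (my_list : List Int) : (List (Int × Int)) × List Int :=
  -- my_dict = {i: my_list.count(i) for i in my_list}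
  let my_dict : PySem.Dict Int Int :=
    my_list.foldl (fun d i => d.insert i (my_list.count i : Int)) PySem.Dict.empty
  -- nested loops over my_dict.items()
  let n : List Int :=
    my_dict.items.foldl (fun n p =>
      my_dict.items.foldl (fun n q =>
        if p.1 == q.1 * (-1) then n ++ [p.1] else n) n) []
  -- for i in range(0, len(n)): if n[i] < 0: nn.append(n[i])
  let nn : List Int :=
    (PySem.List.pyRange 0 (n.length : Int) 1).foldl (fun nn i =>
      if PySem.List.pyGetD n i 0 < 0 then nn ++ [PySem.List.pyGetD n i 0] else nn) []
  (my_dict.items, nn)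

-- ===== PORT B =====
def occurence_alt (my_list : List Int) : (List (Int × Int)) × List Int :=
  let counts : PySem.Dict Int Int :=
    my_list.foldl (fun d x => d.insert x (d.getD x 0 + 1)) PySem.Dict.empty
  (counts.items, counts.keys.filter (fun k => decide (k < 0) && counts.contains (-k)))

-- ===== PRECONDITION & SPEC =====
def Spec_occurence (my_list : List Int) (out : (List (Int × Int)) × List Int) : Prop := out = occurence_alt my_list
instance (my_list : List Int) (out : (List (Int × Int)) × List Int) : Decidable (Spec_occurence my_list out) := by unfold Spec_occurence; infer_instance

-- ===== CLAIM (what is proved, stated in full; the proofs are below) =====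
def Claim_equal_occurence : Prop := ∀ (my_list : List Int), Dom_occurence my_list → Spec_occurence my_list (occurence my_list)

-- ===== LEMMAS AND PROOFS =====

-- A's dict lookups: inserting the full-list count for every element gives the count.
theorem getD_foldl_insert_count (l : List Int) (c : Int → Int) (d : PySem.Dict Int Int) (k : Int) :
    (l.foldl (fun d i => d.insert i (c i)) d).getD k 0
      = if k ∈ l then c k else d.getD k 0 := by
  induction l generalizing d with
  | nil => simp
  | cons x t ih =>
    simp only [List.foldl_cons, ih, List.mem_cons]
    by_cases hkt : k ∈ t
    · simp [hkt]
    · by_cases hkx : k = x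
      · simp [hkx]
      · simp [hkx, hkt, PySem.Dict.getD_insert]

theorem dictA_eq_counter (l : List Int) :
    l.foldl (fun d i => d.insert i (l.count i : Int)) PySem.Dict.empty
      = PySem.Dict.counter l := by
  apply PySem.Dict.ext
  have hndA : (l.foldl (fun d i => d.insert i (l.count i : Int)) PySem.Dict.empty).keys.Nodup :=
    PySem.Dict.nodup_keys_foldl_insert _ _ _ PySem.Dict.nodup_keys_empty
  have hkA : (l.foldl (fun d i => d.insert i (l.count i : Int)) PySem.Dict.empty).keys
      = PySem.Set.ofList l := by
    rw [PySem.Dict.keys_foldl_insert]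
    simp [PySem.Dict.keys_empty, PySem.Set.update, PySem.Set.ofList_eq_foldl]
  rw [PySem.Dict.items_eq_map_keys _ hndA 0, PySem.Dict.items_counter, hkA]
  apply List.map_congr_left
  intro k hk
  have hkl : k ∈ l := (PySem.Set.mem_ofList ..).mp hk
  simp [getD_foldl_insert_count, hkl]

-- key == -k for some key k of a Nodup list appends key exactly once iff -key is in the list.
theorem inner_loop_eq (ks : List Int) (hnd : ks.Nodup) (a : Int) (acc : List Int) :
    ks.foldl (fun n q => if a == q * (-1) then n ++ [a] else n) acc
      = acc ++ (if -a ∈ ks then [a] else []) := by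
  induction ks generalizing acc with
  | nil => simp
  | cons x t ih =>
    have hxt : x ∉ t := (List.nodup_cons.mp hnd).1
    have hndt : t.Nodup := (List.nodup_cons.mp hnd).2
    simp only [List.foldl_cons, List.mem_cons]
    by_cases hax : a = x * (-1)
    · have hmem : -a = x := by omega
      have hnt : -a ∉ t := by rw [hmem]; exact hxt
      rw [if_pos (by simp [hax]), ih hndt, if_neg hnt, if_pos (Or.inl hmem)]
      simp
    · have hne : ¬ (-a = x) := by omega
      have hne2 : ¬ (a = -x) := by omega
      rw [if_neg (by simpa using hne2), ih hndt]
      by_cases hmt : -a ∈ t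
      · simp [hmt]
      · simp [hmt, hne]

-- The range-indexing copy loop is a filter.
theorem range_copy_eq_filter (n : List Int) :
    (PySem.List.pyRange 0 (n.length : Int) 1).foldl (fun nn i =>
      if PySem.List.pyGetD n i 0 < 0 then nn ++ [PySem.List.pyGetD n i 0] else nn) []
      = n.filter (fun x => decide (x < 0)) := by
  have hmap := PySem.List.map_pyGetD_pyRange_zero n 0
  simp only [PySem.List.len] at hmap
  calc (PySem.List.pyRange 0 (n.length : Int) 1).foldl (fun nn i =>
        if PySem.List.pyGetD n i 0 < 0 then nn ++ [PySem.List.pyGetD n i 0] else nn) []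
      = ((PySem.List.pyRange 0 (n.length : Int) 1).map (fun i => PySem.List.pyGetD n i 0)).foldl
          (fun nn x => if x < 0 then nn ++ [x] else nn) [] := by
        rw [List.foldl_map]
    _ = n.foldl (fun nn x => if x < 0 then nn ++ [x] else nn) [] := by rw [hmap]
    _ = n.filter (fun x => decide (x < 0)) := by
        simpa using PySem.List.foldl_append_ite_eq_filter (fun x : Int => x < 0) n []

theorem occurence_eq (my_list : List Int) : occurence my_list = occurence_alt my_list := by
  have hcnt := dictA_eq_counter my_list
  simp only [occurence, occurence_alt, PySem.Dict.foldl_insert_getD_add_one_eq_counter, hcnt]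
  set d := PySem.Dict.counter my_list with hd
  have hnd : d.keys.Nodup := PySem.Dict.nodup_keys_counter my_list
  have hkeq : d.keys = d.items.map (·.1) := by simp only [PySem.Dict.keys]
  have houter : d.items.foldl (fun n p =>
      d.items.foldl (fun n q => if p.1 == q.1 * (-1) then n ++ [p.1] else n) n) []
      = d.keys.filter (fun k => decide (-k ∈ d.keys)) := by
    calc d.items.foldl (fun n p =>
          d.items.foldl (fun n q => if p.1 == q.1 * (-1) then n ++ [p.1] else n) n) []
        = d.items.foldl (fun n p => if -p.1 ∈ d.keys then n ++ [p.1] else n) [] := by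
          apply PySem.List.foldl_congr_mem
          intro acc p _
          have hconv : d.items.foldl (fun n q => if p.1 == q.1 * (-1) then n ++ [p.1] else n) acc
              = (d.items.map (·.1)).foldl (fun n q => if p.1 == q * (-1) then n ++ [p.1] else n) acc := by
            rw [List.foldl_map]
          rw [hconv, ← hkeq, inner_loop_eq d.keys hnd p.1 acc]
          by_cases hmt : -p.1 ∈ d.keys <;> simp [hmt]
      _ = (d.items.map (·.1)).foldl (fun n a => if -a ∈ d.keys then n ++ [a] else n) [] := by
          rw [List.foldl_map]
      _ = d.keys.filter (fun k => decide (-k ∈ d.keys)) := by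
          rw [← hkeq]
          simpa using PySem.List.foldl_append_ite_eq_filter (fun a : Int => -a ∈ d.keys) d.keys []
  rw [houter, range_copy_eq_filter, List.filter_filter]
  congr 1
  apply List.filter_congr
  intro k hk
  have hc : d.contains (-k) = my_list.contains (-k) := PySem.Dict.contains_counter my_list (-k)
  have hmemk : (-k ∈ d.keys) ↔ (-k ∈ my_list) := by
    rw [hd, PySem.Dict.keys_counter, PySem.Set.mem_ofList]
  rw [hc]
  by_cases hm : -k ∈ my_list
  · simp [hm, hmemk.mpr hm]
  · have hnk : -k ∉ d.keys := fun h => hm (hmemk.mp h)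
    simp [hm, hnk]

-- ===== VERDICT (by name: the statement is the Claim_ definition above) =====
theorem occurence_spec : Claim_equal_occurence := by
  intro l _
  unfold Spec_occurence
  exact occurence_eq l
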